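-- pv_equiv track=rewrite | github.com/katqatran/CS-Python | listing.py | is_median
-- ===== SOURCE A (Python) =====
-- def is_median(number, target):
--     """
--     The functions takes a list of numbers and a target value as input, and returns True if the target value is the median
--     of the input list, and False otherwise.
--     False.
--     Arguments:
--         Number (list): List of numbers
--         Target (int): A number
--     Return Value:
--         bool: A boolean value indicating whether the target value is the median of the input list.
--     """
--     lower = 0
--     higher = 0
--
--     for spot in number:
--         if spot > target:
--             higher = higher + 1
--         if spot < target:
--             lower = lower + 1
--     if higher <= len(number)//2 and lower <= len(number)//2:
--         return True
--     return False
-- ===== SOURCE B (Python) =====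
-- def is_median(number, target):
--     if not number:
--         return True
--     s = sorted(number)
--     k = len(s) // 2
--     return s[len(s) - k - 1] <= target <= s[k]
-- ===== Notes on version B (the rewrite author's own statement) =====
-- stated objective: alternative
-- what changed: A counts elements above/below target in one pass and compares both counts to n//2; B sorts a copy and checks the order-statistic bracket s[n-k-1] <= target <= s[k] with k = n//2 (empty list is trivially a median).
import Mathlib
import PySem

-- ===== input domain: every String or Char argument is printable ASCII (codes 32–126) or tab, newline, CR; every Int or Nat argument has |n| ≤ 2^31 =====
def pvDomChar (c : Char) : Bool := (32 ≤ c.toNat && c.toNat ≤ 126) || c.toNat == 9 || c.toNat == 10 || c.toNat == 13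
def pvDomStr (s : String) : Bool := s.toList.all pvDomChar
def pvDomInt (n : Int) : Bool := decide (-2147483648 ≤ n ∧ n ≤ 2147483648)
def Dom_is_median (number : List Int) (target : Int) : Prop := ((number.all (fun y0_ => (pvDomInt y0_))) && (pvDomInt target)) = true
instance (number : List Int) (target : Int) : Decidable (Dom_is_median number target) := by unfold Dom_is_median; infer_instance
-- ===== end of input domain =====

-- B replaces A's counting pass by a sort-then-index order-statistic bracket check (alternative decomposition, not claimed faster).

-- ===== PORT A =====
def is_median (number : List Int) (target : Int) : Bool :=
  let p := number.foldl (fun (acc : Int × Int) spot =>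
      ((if spot > target then acc.1 + 1 else acc.1),
       (if spot < target then acc.2 + 1 else acc.2))) (0, 0)
  if p.1 ≤ PySem.Int.floordiv (number.length : Int) 2 ∧
     p.2 ≤ PySem.Int.floordiv (number.length : Int) 2 then true else false

-- ===== PORT B =====
def is_median_alt (number : List Int) (target : Int) : Bool :=
  if number = [] then true
  else
    let s := PySem.List.sorted number (fun x => x) false
    let k := PySem.Int.floordiv (s.length : Int) 2
    -- s[len(s)-k-1] <= target <= s[k]; the indices are always in range for nonempty s
    match PySem.List.pyGet? s ((s.length : Int) - k - 1), PySem.List.pyGet? s k with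
    | some a, some b => decide (a ≤ target) && decide (target ≤ b)
    | _, _ => false

-- ===== PRECONDITION & SPEC =====
def Spec_is_median (number : List Int) (target : Int) (out : Bool) : Prop := out = is_median_alt number target
instance (number : List Int) (target : Int) (out : Bool) : Decidable (Spec_is_median number target out) := by unfold Spec_is_median; infer_instance

-- ===== CLAIM (what is proved, stated in full; the proofs are below) =====
def Claim_equal_is_median : Prop := ∀ (number : List Int) (target : Int), Dom_is_median number target → Spec_is_median number target (is_median number target)

-- ===== LEMMAS AND PROOFS =====

-- A's fold computes the two comparison counts.
lemma pv_fold_counts (t : Int) : ∀ (xs : List Int) (h l : Int),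
    xs.foldl (fun (acc : Int × Int) spot =>
      ((if spot > t then acc.1 + 1 else acc.1),
       (if spot < t then acc.2 + 1 else acc.2))) (h, l)
    = (h + (xs.countP (fun x => decide (t < x)) : Int),
       l + (xs.countP (fun x => decide (x < t)) : Int)) := by
  intro xs
  induction xs with
  | nil => intro h l; simp
  | cons x xs ih =>
      intro h l
      simp only [List.foldl_cons, ih, List.countP_cons]
      by_cases h1 : t < x <;> by_cases h2 : x < t <;>
        simp [h1, h2, Prod.ext_iff] <;> push_cast <;> omega

-- getElem monotonicity from Pairwise (· ≤ ·)
lemma pv_mono (s : List Int) (hs : s.Pairwise (· ≤ ·)) (p q : Nat) (hpq : p ≤ q)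
    (hq : q < s.length) : s[p]'(lt_of_le_of_lt (by omega) hq) ≤ s[q] := by
  rcases Nat.lt_or_ge p q with h | h
  · exact (List.pairwise_iff_getElem.mp hs) p q _ hq h
  · have : p = q := le_antisymm hpq h
    subst this; exact le_refl _

-- in a sorted list, "at most i elements are < t" iff "t ≤ s[i]"
lemma pv_countLt_iff (s : List Int) (hs : s.Pairwise (· ≤ ·)) (t : Int) (i : Nat)
    (hi : i < s.length) :
    (s.countP (fun x => decide (x < t)) ≤ i ↔ t ≤ s[i]) := by
  constructor
  · intro hc
    by_contra hlt
    push Not at hlt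
    have hall : ∀ x ∈ s.take (i + 1), (fun x => decide (x < t)) x = true := by
      intro x hx
      rcases List.mem_iff_getElem.mp hx with ⟨j, hj, rfl⟩
      have hjl : j < s.length := lt_of_lt_of_le hj (by simp [List.length_take])
      rw [List.getElem_take]
      have hji : j ≤ i := by simp [List.length_take] at hj; omega
      have := pv_mono s hs j i hji hi
      simp only [decide_eq_true_eq]
      exact lt_of_le_of_lt this hlt
    have h1 : (s.take (i + 1)).countP (fun x => decide (x < t)) = i + 1 := by
      rw [List.countP_eq_length.mpr hall, List.length_take]; omega
    have h2 : s.countP (fun x => decide (x < t))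
        = (s.take (i + 1)).countP (fun x => decide (x < t))
          + (s.drop (i + 1)).countP (fun x => decide (x < t)) := by
      rw [← List.countP_append, List.take_append_drop]
    omega
  · intro ht
    have h0 : (s.drop i).countP (fun x => decide (x < t)) = 0 := by
      rw [List.countP_eq_zero]
      intro x hx
      rcases List.mem_iff_getElem.mp hx with ⟨j, hj, rfl⟩
      rw [List.getElem_drop]
      have := pv_mono s hs i (i + j) (by omega) (by simp [List.length_drop] at hj; omega)
      simp only [decide_eq_true_eq]
      omega
    have h2 : s.countP (fun x => decide (x < t))
        = (s.take i).countP (fun x => decide (x < t))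
          + (s.drop i).countP (fun x => decide (x < t)) := by
      rw [← List.countP_append, List.take_append_drop]
    have h3 : (s.take i).countP (fun x => decide (x < t)) ≤ i := by
      calc (s.take i).countP (fun x => decide (x < t)) ≤ (s.take i).length :=
            List.countP_le_length
        _ ≤ i := by simp [List.length_take]
    omega

-- in a sorted list, "at most n-1-i elements are > t" iff "s[i] ≤ t"
lemma pv_countGt_iff (s : List Int) (hs : s.Pairwise (· ≤ ·)) (t : Int) (i : Nat)
    (hi : i < s.length) :
    (s.countP (fun x => decide (t < x)) ≤ s.length - 1 - i ↔ s[i] ≤ t) := by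
  constructor
  · intro hc
    by_contra hlt
    push Not at hlt
    have hall : ∀ x ∈ s.drop i, (fun x => decide (t < x)) x = true := by
      intro x hx
      rcases List.mem_iff_getElem.mp hx with ⟨j, hj, rfl⟩
      rw [List.getElem_drop]
      have := pv_mono s hs i (i + j) (by omega) (by simp [List.length_drop] at hj; omega)
      simp only [decide_eq_true_eq]
      omega
    have h1 : (s.drop i).countP (fun x => decide (t < x)) = s.length - i := by
      rw [List.countP_eq_length.mpr hall, List.length_drop]
    have h2 : s.countP (fun x => decide (t < x))
        = (s.take i).countP (fun x => decide (t < x))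
          + (s.drop i).countP (fun x => decide (t < x)) := by
      rw [← List.countP_append, List.take_append_drop]
    omega
  · intro ht
    have h0 : (s.take (i + 1)).countP (fun x => decide (t < x)) = 0 := by
      rw [List.countP_eq_zero]
      intro x hx
      rcases List.mem_iff_getElem.mp hx with ⟨j, hj, rfl⟩
      have hjl : j < s.length := lt_of_lt_of_le hj (by simp [List.length_take])
      rw [List.getElem_take]
      have hji : j ≤ i := by simp [List.length_take] at hj; omega
      have := pv_mono s hs j i hji hi
      simp only [decide_eq_true_eq]
      omega
    have h2 : s.countP (fun x => decide (t < x))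
        = (s.take (i + 1)).countP (fun x => decide (t < x))
          + (s.drop (i + 1)).countP (fun x => decide (t < x)) := by
      rw [← List.countP_append, List.take_append_drop]
    have h3 : (s.drop (i + 1)).countP (fun x => decide (t < x)) ≤ s.length - 1 - i := by
      calc (s.drop (i + 1)).countP (fun x => decide (t < x)) ≤ (s.drop (i + 1)).length :=
            List.countP_le_length
        _ ≤ s.length - 1 - i := by simp [List.length_drop]; omega
    omega

-- ===== VERDICT (by name: the statement is the Claim_ definition above) =====
theorem is_median_spec : Claim_equal_is_median := by
  intro number target _
  unfold Spec_is_median is_median is_median_alt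
  by_cases hne : number = []
  · subst hne; simp [PySem.Int.floordiv]
  · simp only [if_neg hne]
    set s := PySem.List.sorted number (fun x => x) false with hsdef
    have hperm : s.Perm number := PySem.List.sorted_perm number (fun x => x) false
    have hm : s.length = number.length := hperm.length_eq
    have hs : s.Pairwise (· ≤ ·) := by
      have := PySem.List.sorted_pairwise (xs := number) (key := fun x => x)
      simpa using this
    have hn : 0 < number.length := List.length_pos_iff.mpr hne
    have hfd : PySem.Int.floordiv ((number.length : Nat) : Int) 2
        = ((number.length / 2 : Nat) : Int) := PySem.Int.floordiv_natCast number.length 2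
    have hidx : (((number.length : Nat) : Int) - ((number.length / 2 : Nat) : Int) - 1)
        = ((number.length - number.length / 2 - 1 : Nat) : Int) := by omega
    have hi1 : number.length - number.length / 2 - 1 < s.length := by omega
    have hk2 : number.length / 2 < s.length := by omega
    rw [pv_fold_counts, hm, hfd, hidx, PySem.List.pyGet?_natCast, PySem.List.pyGet?_natCast]
    rw [List.getElem?_eq_getElem hi1, List.getElem?_eq_getElem hk2]
    have hcl : number.countP (fun x => decide (x < target))
        = s.countP (fun x => decide (x < target)) := (hperm.countP_eq _).symm
    have hcg : number.countP (fun x => decide (target < x))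
        = s.countP (fun x => decide (target < x))  := (hperm.countP_eq _).symm
    have e1 : s.countP (fun x => decide (target < x)) ≤ number.length / 2 ↔
        s[number.length - number.length / 2 - 1]'hi1 ≤ target := by
      have := pv_countGt_iff s hs target (number.length - number.length / 2 - 1) hi1
      rw [← this, hm]
      constructor <;> intro h <;> omega
    have e2 : s.countP (fun x => decide (x < target)) ≤ number.length / 2 ↔
        target ≤ s[number.length / 2]'hk2 :=
      pv_countLt_iff s hs target (number.length / 2) hk2
    simp only [zero_add, hcl, hcg]
    by_cases c1 : s.countP (fun x => decide (target < x)) ≤ number.length / 2 <;>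
      by_cases c2 : s.countP (fun x => decide (x < target)) ≤ number.length / 2
    · simp [e1.mp c1, e2.mp c2]; omega
    · simp [e1.mp c1, e2.not.mp c2]; intros; omega
    · simp [e1.not.mp c1]; intros; omega
    · simp [e1.not.mp c1]; intros; omega
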